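-- pv_equiv track=rewrite | github.com/Technoturnovers/advent-of-code-2020 | day-six/main.py | part_two
-- ===== SOURCE A (Python) =====
-- import string
--
-- def part_two(blob: str) -> int:
--     groups = [ group.split() for group in blob.split('\n\n') ]
--     count = 0
--     for group in groups:
--         for letter in string.ascii_lowercase:
--             if all(letter in entry for entry in group):
--                 count += 1
--     return count
-- ===== SOURCE B (Python) =====
-- import string
--
-- def part_two(blob: str) -> int:
--     total = 0
--     for group in blob.split('\n\n'):
--         common = set(string.ascii_lowercase)
--         for entry in group.split():
--             common &= set(entry)
--         total += len(common)
--     return total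
-- ===== Notes on version B (the rewrite author's own statement) =====
-- stated objective: idiomatic
-- what changed: Replaces the 26-letter membership scan per group by a per-group set-intersection reduction seeded with the full lowercase alphabet.
import Mathlib
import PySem

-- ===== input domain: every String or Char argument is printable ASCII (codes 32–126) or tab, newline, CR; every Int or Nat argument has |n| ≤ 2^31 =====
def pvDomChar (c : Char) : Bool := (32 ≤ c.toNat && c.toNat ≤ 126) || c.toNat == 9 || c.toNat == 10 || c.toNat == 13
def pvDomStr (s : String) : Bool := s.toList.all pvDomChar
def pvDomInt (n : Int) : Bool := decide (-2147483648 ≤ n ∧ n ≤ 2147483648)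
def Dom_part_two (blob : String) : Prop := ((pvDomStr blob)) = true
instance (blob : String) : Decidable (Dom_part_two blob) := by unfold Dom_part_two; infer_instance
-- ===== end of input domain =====

-- B replaces A's 26-letter × entries membership scan per group by a per-group set-intersection
-- reduction seeded with the full lowercase alphabet (idiomatic; same results).

-- ===== PORT A =====
def asciiLowercase : List Char := "abcdefghijklmnopqrstuvwxyz".toList

-- blob.split('\n\n'): split? is none only for sep = "", so .getD [] is exact here
def part_two (blob : String) : Int :=
  let groups := ((PySem.Str.split? blob "\n\n").getD []).map (fun g => PySem.Str.split₀ g)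
  groups.foldl (fun count group =>
    asciiLowercase.foldl (fun count letter =>
      if group.all (fun entry => PySem.Str.isIn (String.ofList [letter]) entry) then count + 1
      else count) count) 0

-- ===== PORT B =====
def part_two_alt (blob : String) : Int :=
  ((PySem.Str.split? blob "\n\n").getD []).foldl (fun total group =>
    let common : PySem.Set Char :=
      (PySem.Str.split₀ group).foldl
        (fun common entry => PySem.Set.inter common (PySem.Set.ofList entry.toList))
        (PySem.Set.ofList asciiLowercase)
    total + PySem.Set.len common) 0

-- ===== PRECONDITION & SPEC =====
def Spec_part_two (blob : String) (out : Int) : Prop := out = part_two_alt blob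
instance (blob : String) (out : Int) : Decidable (Spec_part_two blob out) := by unfold Spec_part_two; infer_instance

-- ===== CLAIM (what is proved, stated in full; the proofs are below) =====
def Claim_equal_part_two : Prop := ∀ (blob : String), Dom_part_two blob → Spec_part_two blob (part_two blob)

-- ===== LEMMAS AND PROOFS =====

theorem singleton_infix_iff {α : Type} (a : α) (l : List α) : [a] <:+: l ↔ a ∈ l := by
  constructor
  · intro h; exact List.singleton_sublist.mp h.sublist
  · intro h
    obtain ⟨s, t, rfl⟩ := List.append_of_mem h
    exact ⟨s, t, by simp⟩

theorem isIn_singleton (c : Char) (xs : List Char) :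
    PySem.Chars.isIn [c] xs = decide (c ∈ xs) := by
  apply Bool.coe_iff_coe.mp
  rw [PySem.Chars.isIn_iff_infix]
  simp [singleton_infix_iff]

theorem inter_eq_filter (s : PySem.Set Char) (t : List Char) :
    PySem.Set.inter s (PySem.Set.ofList t) = s.filter (fun x => t.contains x) := by
  simp only [PySem.Set.inter]
  exact List.filter_congr (fun x _ => by
    simp [List.contains_eq_mem, PySem.Set.mem_ofList])

theorem fold_inter_eq_filter (es : List String) (s : List Char) :
    es.foldl (fun common entry => PySem.Set.inter common (PySem.Set.ofList entry.toList)) s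
      = s.filter (fun l => es.all (fun e => e.toList.contains l)) := by
  induction es generalizing s with
  | nil => simp
  | cons e es ih =>
      rw [List.foldl_cons, ih, inter_eq_filter, List.filter_filter]
      exact List.filter_congr (fun x _ => by simp [List.all_cons, Bool.and_comm])

theorem group_count_eq (es : List String) (c : Int) :
    asciiLowercase.foldl (fun count letter =>
        if es.all (fun entry => PySem.Str.isIn (String.ofList [letter]) entry) then count + 1
        else count) c
      = c + PySem.Set.len
          (es.foldl (fun common entry => PySem.Set.inter common (PySem.Set.ofList entry.toList))
            (PySem.Set.ofList asciiLowercase)) := by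
  rw [PySem.List.foldl_if_add_one, fold_inter_eq_filter,
      show PySem.Set.ofList asciiLowercase = asciiLowercase from by decide]
  simp only [PySem.Set.len, List.countP_eq_length_filter]
  congr 2
  apply congrArg List.length
  apply List.filter_congr
  intro l _
  simp [isIn_singleton]

-- ===== VERDICT (by name: the statement is the Claim_ definition above) =====
theorem part_two_spec : Claim_equal_part_two := by
  intro blob _
  unfold Spec_part_two part_two part_two_alt
  rw [List.foldl_map]
  exact (PySem.List.foldl_congr_mem _ _ _ _
    (fun c g _ => group_count_eq (PySem.Str.split₀ g) c))
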